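-- pv_equiv track=rewrite | github.com/steveya/trellis | trellis/agent/knowledge/import_registry.py | _build_package_map
-- ===== SOURCE A (Python) =====
-- from collections import defaultdict
--
-- def _build_package_map(
--     registry: dict[str, tuple[str, ...]],
-- ) -> tuple[dict[str, tuple[str, ...]], dict[str, str]]:
--     """Group live modules into stable package roots."""
--     package_to_modules: dict[str, list[str]] = defaultdict(list)
--     module_to_package: dict[str, str] = {}
--     for module_path in sorted(registry):
--         package = _module_package_root(module_path)
--         package_to_modules[package].append(module_path)
--         module_to_package[module_path] = package
--     return (
--         {package: tuple(sorted(modules)) for package, modules in package_to_modules.items()},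
--         module_to_package,
--     )
--
-- def _module_package_root(module_path: str) -> str:
--     """Return the coarse package root for a module path."""
--     parts = module_path.split(".")
--     if len(parts) <= 2:
--         return module_path
--     return ".".join(parts[:2])
-- ===== SOURCE B (Python) =====
-- def _module_package_root(module_path: str) -> str:
--     parts = module_path.split(".")
--     if len(parts) <= 2:
--         return module_path
--     return ".".join(parts[:2])
--
--
-- def _build_package_map(registry):
--     """Group live modules into stable package roots."""
--     module_to_package = {m: _module_package_root(m) for m in sorted(registry)}
--     package_to_modules = {
--         root: tuple(m for m, p in module_to_package.items() if p == root)
--         for root in dict.fromkeys(module_to_package.values())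
--     }
--     return package_to_modules, module_to_package
-- ===== Notes on version B (the rewrite author's own statement) =====
-- stated objective: simpler
-- what changed: Replaces A's defaultdict bucket-accumulation loop with per-group re-sorts by two plain comprehensions: build the module-to-package map over the sorted modules first, then derive each package's tuple by filtering that map per distinct root (the modules are already sorted, so no group is ever re-sorted and no mutable buckets exist).
import Mathlib
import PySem

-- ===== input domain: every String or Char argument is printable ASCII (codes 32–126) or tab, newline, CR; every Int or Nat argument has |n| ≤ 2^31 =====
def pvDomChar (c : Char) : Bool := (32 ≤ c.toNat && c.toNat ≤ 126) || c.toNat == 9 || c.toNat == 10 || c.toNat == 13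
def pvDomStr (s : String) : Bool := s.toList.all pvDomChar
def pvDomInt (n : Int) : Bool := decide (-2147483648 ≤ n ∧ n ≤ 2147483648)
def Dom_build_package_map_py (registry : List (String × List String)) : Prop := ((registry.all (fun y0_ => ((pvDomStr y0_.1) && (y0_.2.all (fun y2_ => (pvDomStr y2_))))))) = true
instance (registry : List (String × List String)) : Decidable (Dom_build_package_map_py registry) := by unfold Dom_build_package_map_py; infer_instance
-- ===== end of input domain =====

-- B builds the module-to-package map first (one comprehension over the sorted modules)
-- and then derives each package's group by filtering that map per distinct root, instead
-- of A's defaultdict bucket-accumulation loop with a per-group re-sort (simpler staging,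
-- same value).

-- ===== PORT A =====
-- _module_package_root (same-module helper used by both Pythons, transliterated once)
def module_package_root (module_path : String) : String :=
  let parts := PySem.Chars.splitOn module_path.toList ['.']
  if parts.length ≤ 2 then module_path
  else String.ofList (PySem.Chars.join ['.'] (parts.take 2))

def build_package_map_py (registry : List (String × List String)) : (List (String × List String)) × (List (String × String)) :=
  -- for module_path in sorted(registry): package_to_modules[package].append(module_path);
  -- module_to_package[module_path] = package   (package = _module_package_root(module_path), written inline here)
  let st := (PySem.List.sorted (PySem.Dict.ofList registry).keys (fun x => x) false).foldl
    (fun (st : PySem.Dict String (List String) × PySem.Dict String String) module_path =>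
      ((st.1.modify (module_package_root module_path) [] (fun l => l ++ [module_path])),
       (st.2.insert module_path (module_package_root module_path))))
    (PySem.Dict.empty, PySem.Dict.empty)
  -- ({package: tuple(sorted(modules)) for ...}, module_to_package)
  (st.1.items.map (fun p => (p.1, PySem.List.sorted p.2 (fun x => x) false)), st.2.items)

-- ===== PORT B =====
def build_package_map_py_alt (registry : List (String × List String)) : (List (String × List String)) × (List (String × String)) :=
  -- module_to_package = {m: _module_package_root(m) for m in sorted(registry)}
  let module_to_package :=
    (PySem.List.sorted (PySem.Dict.ofList registry).keys (fun x => x) false).foldl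
      (fun (d : PySem.Dict String String) m => d.insert m (module_package_root m))
      PySem.Dict.empty
  -- {root: tuple(m for m, p in module_to_package.items() if p == root)
  --  for root in dict.fromkeys(module_to_package.values())}
  let package_to_modules :=
    ((PySem.List.dedup module_to_package.values).foldl
      (fun (d : PySem.Dict String (List String)) root =>
        d.insert root
          (module_to_package.items.filterMap
            (fun p => if p.2 == root then some p.1 else none)))
      PySem.Dict.empty).items
  (package_to_modules, module_to_package.items)

-- ===== PRECONDITION & SPEC =====
def Spec_build_package_map_py (registry : List (String × List String)) (out : (List (String × List String)) × (List (String × String))) : Prop := out = build_package_map_py_alt registry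
instance (registry : List (String × List String)) (out : (List (String × List String)) × (List (String × String))) : Decidable (Spec_build_package_map_py registry out) := by unfold Spec_build_package_map_py; infer_instance

-- ===== CLAIM (what is proved, stated in full; the proofs are below) =====
def Claim_equal_build_package_map_py : Prop := ∀ (registry : List (String × List String)), Dom_build_package_map_py registry → Spec_build_package_map_py registry (build_package_map_py registry)

-- ===== LEMMAS AND PROOFS =====

-- selecting the second component by filterMap over (m, root m) pairs = filtering the modules
theorem pv_filterMap_pairs (l : List String) (r : String) :
    (l.map (fun m => (m, module_package_root m))).filterMap
        (fun p => if p.2 == r then some p.1 else none)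
      = l.filter (fun m => module_package_root m == r) := by
  induction l with
  | nil => rfl
  | cons x t ih =>
    simp only [List.map_cons, List.filterMap_cons]
    rw [ih]
    by_cases h : (module_package_root x == r) = true
    · simp [h]
    · simp [h]

theorem pv_main (registry : List (String × List String)) :
    build_package_map_py registry = build_package_map_py_alt registry := by
  unfold build_package_map_py build_package_map_py_alt
  set ms := PySem.List.sorted (PySem.Dict.ofList registry).keys (fun x => x) false with hms
  have hperm := PySem.List.sorted_perm (PySem.Dict.ofList registry).keys (fun x => x) false
  have hnd : ms.Nodup := (hperm.nodup_iff).mpr (PySem.Dict.nodup_keys_ofList registry)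
  have hlt : ms.Pairwise (· < ·) := by
    have hle := PySem.List.sorted_pairwise (PySem.Dict.ofList registry).keys (fun x => x)
    exact (hle.and hnd).imp (fun h => lt_of_le_of_ne h.1 h.2)
  rw [PySem.List.foldl_prod_mk
    (f := fun d m => PySem.Dict.modify d (module_package_root m) [] (fun l => l ++ [m]))
    (g := fun d m => PySem.Dict.insert d m (module_package_root m))]
  set M := ms.foldl (fun (d : PySem.Dict String String) m => d.insert m (module_package_root m))
    PySem.Dict.empty with hM
  have hMitems : M.items = ms.map (fun m => (m, module_package_root m)) := by
    rw [hM, PySem.Dict.items_foldl_insert_fresh (k := fun m => m)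
      (v := fun m => module_package_root m) _ _ (by simp) (by simpa using hnd)]
    simp [show (PySem.Dict.empty : PySem.Dict String String).items = [] from rfl]
  have hMvals : M.values = ms.map module_package_root := by
    have : M.values = M.items.map Prod.snd := rfl
    rw [this, hMitems, List.map_map]
    rfl
  refine Prod.ext ?_ rfl
  -- the package_to_modules component
  set D := ms.foldl
    (fun d m => PySem.Dict.modify d (module_package_root m) [] (fun l => l ++ [m]))
    PySem.Dict.empty with hD
  have hndk : D.keys.Nodup := by
    exact PySem.Dict.nodup_keys_foldl_modify_key ms module_package_root []
      (fun _ x => fun l => l ++ [x]) PySem.Dict.empty (by simp)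
  have hkeys : D.keys = PySem.List.dedup (ms.map module_package_root) := by
    rw [hD, PySem.Dict.keys_foldl_modify_key ms module_package_root []
      (fun _ x => fun l => l ++ [x]) PySem.Dict.empty]
    simp [PySem.List.dedup_eq_ofList, PySem.Dict.keys_empty, PySem.Set.update,
      PySem.Set.ofList]
  have hgetD : ∀ r, D.getD r [] = ms.filter (fun m => module_package_root m == r) := by
    intro r
    have h1 : D = (ms.map (fun m => (module_package_root m, m))).foldl
        (fun d p => PySem.Dict.modify d p.1 [] (fun l => l ++ [p.2])) PySem.Dict.empty := by
      rw [hD, List.foldl_map]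
    rw [h1, PySem.Dict.getD_foldl_modify_append]
    simp [List.filter_map, Function.comp_def]
  show (List.map (fun p => (p.1, PySem.List.sorted p.2 (fun x => x) false)) D.items) =
    (List.foldl (fun d root => d.insert root
        (M.items.filterMap (fun p => if p.2 == root then some p.1 else none)))
      PySem.Dict.empty (PySem.List.dedup M.values)).items
  rw [hMvals,
    PySem.Dict.items_foldl_insert_fresh (k := fun r => r)
      (v := fun root => M.items.filterMap (fun p => if p.2 == root then some p.1 else none))
      _ _ (by simp) (by simpa using PySem.List.nodup_dedup (ms.map module_package_root))]
  rw [PySem.Dict.items_eq_map_keys D hndk [], hkeys, List.map_map]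
  simp only [show (PySem.Dict.empty : PySem.Dict String (List String)).items = [] from rfl,
    List.nil_append]
  refine List.map_congr_left ?_
  intro r _
  simp only [Function.comp_apply, hgetD r, hMitems, pv_filterMap_pairs, Prod.mk.injEq, true_and]
  exact PySem.List.sorted_eq_of_perm_of_pairwise_lt _ _ _ (List.Perm.refl _)
    (hlt.sublist List.filter_sublist)

-- ===== VERDICT (by name: the statement is the Claim_ definition above) =====
theorem build_package_map_py_spec : Claim_equal_build_package_map_py := by
  intro registry _
  exact pv_main registry
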